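-- pv_equiv track=rewrite | github.com/BroCoder007/Loopy_SimonTatham_Games | logic/generators/demo_puzzle.py | _compute_clues
-- ===== SOURCE A (Python) =====
-- def _norm(u, v):
--     """Normalize edge to sorted tuple."""
--     return tuple(sorted((u, v)))
--
-- def _compute_clues(solution_edges, rows, cols):
--     """Compute all clue values from a solution edge set."""
--     clues = {}
--     for r in range(rows):
--         for c in range(cols):
--             count = 0
--             if _norm((r, c), (r, c + 1)) in solution_edges:
--                 count += 1
--             if _norm((r + 1, c), (r + 1, c + 1)) in solution_edges:
--                 count += 1
--             if _norm((r, c), (r + 1, c)) in solution_edges: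
--                 count += 1
--             if _norm((r, c + 1), (r + 1, c + 1)) in solution_edges:
--                 count += 1
--             clues[(r, c)] = count
--     return clues
-- ===== SOURCE B (Python) =====
-- def _compute_clues(solution_edges, rows, cols):
--     """Compute all clue values from a solution edge set.
--
--     One pass: start every grid cell at 0, then scatter each distinct
--     sorted unit edge onto the (at most two) cells it borders.
--     """
--     clues = {(r, c): 0 for r in range(rows) for c in range(cols)}
--     for (a, b), (p, q) in dict.fromkeys(solution_edges):
--         if p == a and q == b + 1:        # horizontal unit edge, endpoints sorted
--             for cell in ((a, b), (a - 1, b)):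
--                 if cell in clues:
--                     clues[cell] += 1
--         elif q == b and p == a + 1:      # vertical unit edge, endpoints sorted
--             for cell in ((a, b), (a, b - 1)):
--                 if cell in clues:
--                     clues[cell] += 1
--     return clues
-- ===== Notes on version B (the rewrite author's own statement) =====
-- stated objective: faster
-- what changed: Instead of testing, for every grid cell, membership of its four sorted edges in the edge list, B zero-initializes all cells once and makes a single pass over the distinct edges, scattering each sorted unit edge onto the (at most two) cells it borders.
import Mathlib
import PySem

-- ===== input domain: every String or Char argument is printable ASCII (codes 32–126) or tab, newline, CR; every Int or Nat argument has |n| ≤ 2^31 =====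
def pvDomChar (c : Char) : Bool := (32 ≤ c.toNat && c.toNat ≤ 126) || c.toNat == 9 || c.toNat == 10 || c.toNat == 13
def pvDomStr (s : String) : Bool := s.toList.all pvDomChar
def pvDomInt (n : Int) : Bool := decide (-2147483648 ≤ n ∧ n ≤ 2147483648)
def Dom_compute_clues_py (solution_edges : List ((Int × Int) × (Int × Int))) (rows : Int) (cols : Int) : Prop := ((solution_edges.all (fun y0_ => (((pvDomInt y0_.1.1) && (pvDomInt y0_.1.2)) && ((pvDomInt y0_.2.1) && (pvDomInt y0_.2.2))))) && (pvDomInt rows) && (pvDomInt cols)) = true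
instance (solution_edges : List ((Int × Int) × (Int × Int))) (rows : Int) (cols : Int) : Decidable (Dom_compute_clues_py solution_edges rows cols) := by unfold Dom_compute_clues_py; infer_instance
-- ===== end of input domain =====

-- B replaces A's per-cell membership scan of the edge list by a single scatter pass over the
-- distinct edges onto zero-initialized cells (faster: O(rows*cols*E) → O(rows*cols + E) edge work).

-- ===== PORT A =====
-- tuple(sorted((u, v))) for 2-tuples of ints (Python lexicographic order)
def pvNorm (u v : Int × Int) : (Int × Int) × (Int × Int) :=
  if v.1 < u.1 ∨ (v.1 = u.1 ∧ v.2 < u.2) then (v, u) else (u, v)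

def compute_clues_py (solution_edges : List ((Int × Int) × (Int × Int))) (rows : Int) (cols : Int) : List (Int × Int × Int) :=
  let clues : PySem.Dict (Int × Int) Int :=
    (PySem.List.pyRange 0 rows 1).foldl (fun d r =>
      (PySem.List.pyRange 0 cols 1).foldl (fun d c =>
        let count0 : Int := 0
        let count1 := if pvNorm (r, c) (r, c + 1) ∈ solution_edges then count0 + 1 else count0
        let count2 := if pvNorm (r + 1, c) (r + 1, c + 1) ∈ solution_edges then count1 + 1 else count1
        let count3 := if pvNorm (r, c) (r + 1, c) ∈ solution_edges then count2 + 1 else count2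
        let count4 := if pvNorm (r, c + 1) (r + 1, c + 1) ∈ solution_edges then count3 + 1 else count3
        d.insert (r, c) count4) d) PySem.Dict.empty
  clues.items.map (fun p => (p.1.1, p.1.2, p.2))

-- ===== PORT B =====
-- 'if cell in clues: clues[cell] += 1'
def pvBump (d : PySem.Dict (Int × Int) Int) (cell : Int × Int) : PySem.Dict (Int × Int) Int :=
  if d.contains cell then d.insert cell (d.getD cell 0 + 1) else d

def compute_clues_py_alt (solution_edges : List ((Int × Int) × (Int × Int))) (rows : Int) (cols : Int) : List (Int × Int × Int) :=
  let init : PySem.Dict (Int × Int) Int :=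
    (PySem.List.pyRange 0 rows 1).foldl (fun d r =>
      (PySem.List.pyRange 0 cols 1).foldl (fun d c => d.insert (r, c) 0) d) PySem.Dict.empty
  let clues :=
    (PySem.List.dedup solution_edges).foldl (fun d e =>
      let a := e.1.1; let b := e.1.2; let p := e.2.1; let q := e.2.2
      if p = a ∧ q = b + 1 then pvBump (pvBump d (a, b)) (a - 1, b)
      else if q = b ∧ p = a + 1 then pvBump (pvBump d (a, b)) (a, b - 1)
      else d) init
  clues.items.map (fun p => (p.1.1, p.1.2, p.2))

-- ===== PRECONDITION & SPEC =====
def Spec_compute_clues_py (solution_edges : List ((Int × Int) × (Int × Int))) (rows : Int) (cols : Int) (out : List (Int × Int × Int)) : Prop := out = compute_clues_py_alt solution_edges rows cols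
instance (solution_edges : List ((Int × Int) × (Int × Int))) (rows : Int) (cols : Int) (out : List (Int × Int × Int)) : Decidable (Spec_compute_clues_py solution_edges rows cols out) := by unfold Spec_compute_clues_py; infer_instance

-- ===== CLAIM (what is proved, stated in full; the proofs are below) =====
def Claim_equal_compute_clues_py : Prop := ∀ (solution_edges : List ((Int × Int) × (Int × Int))) (rows : Int) (cols : Int), Dom_compute_clues_py solution_edges rows cols → Spec_compute_clues_py solution_edges rows cols (compute_clues_py solution_edges rows cols)

-- ===== LEMMAS AND PROOFS =====

-- the row-major cell list
def pvCells (rows cols : Int) : List (Int × Int) :=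
  (PySem.List.pyRange 0 rows 1).flatMap (fun r => (PySem.List.pyRange 0 cols 1).map (fun c => (r, c)))

-- A's count for one cell
def pvCountA (S : List ((Int × Int) × (Int × Int))) (r c : Int) : Int :=
  (if ((r, c), (r, c + 1)) ∈ S then (1 : Int) else 0)
  + (if ((r + 1, c), (r + 1, c + 1)) ∈ S then 1 else 0)
  + (if ((r, c), (r + 1, c)) ∈ S then 1 else 0)
  + (if ((r, c + 1), (r + 1, c + 1)) ∈ S then 1 else 0)

-- does edge e touch cell rc in B's scatter?
def pvHits (e : (Int × Int) × (Int × Int)) (rc : Int × Int) : Bool :=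
  if e.2.1 = e.1.1 ∧ e.2.2 = e.1.2 + 1 then
    decide (rc = (e.1.1, e.1.2) ∨ rc = (e.1.1 - 1, e.1.2))
  else if e.2.2 = e.1.2 ∧ e.2.1 = e.1.1 + 1 then
    decide (rc = (e.1.1, e.1.2) ∨ rc = (e.1.1, e.1.2 - 1))
  else false

lemma pvCells_nodup (rows cols : Int) : (pvCells rows cols).Nodup := by
  unfold pvCells
  rw [List.nodup_flatMap]
  constructor
  · intro r _
    exact (PySem.List.nodup_pyRange_one 0 cols).map (fun c c' h => by simpa using h)
  · have hp := PySem.List.pairwise_lt_pyRange_one 0 rows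
    refine hp.imp ?_
    intro r r' hlt a ha ha' 
    simp only [List.mem_map] at ha ha'
    obtain ⟨c, _, rfl⟩ := ha
    obtain ⟨c', _, h⟩ := ha'
    have : r' = r := (Prod.mk.injEq _ _ _ _).mp h |>.1
    omega

lemma pvFoldl_flatMap {α β γ : Type} (l : List α) (f : α → List β) (g : γ → β → γ) (init : γ) :
    (l.flatMap f).foldl g init = l.foldl (fun acc a => (f a).foldl g acc) init := by
  induction l generalizing init with
  | nil => rfl
  | cons x xs ih => simp [List.flatMap_cons, List.foldl_append, ih]

lemma pvDouble_fold (f : Int → Int → Int) (rows cols : Int) :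
    ((PySem.List.pyRange 0 rows 1).foldl (fun d r =>
      (PySem.List.pyRange 0 cols 1).foldl (fun d c => d.insert (r, c) (f r c)) d)
      (PySem.Dict.empty : PySem.Dict (Int × Int) Int)).items
      = (pvCells rows cols).map (fun rc => (rc, f rc.1 rc.2)) := by
  have h1 : ((pvCells rows cols).foldl
      (fun (d : PySem.Dict (Int × Int) Int) rc => d.insert rc (f rc.1 rc.2)) PySem.Dict.empty).items
      = (PySem.Dict.empty : PySem.Dict (Int × Int) Int).items
        ++ (pvCells rows cols).map (fun rc => ((fun x => x) rc, f rc.1 rc.2)) := by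
    exact PySem.Dict.items_foldl_insert_fresh (pvCells rows cols) (fun x => x)
      (fun rc => f rc.1 rc.2) PySem.Dict.empty
      (fun a _ => PySem.Dict.contains_empty a) (by simpa using pvCells_nodup rows cols)
  unfold pvCells at *
  rw [pvFoldl_flatMap] at h1
  simp only [List.foldl_map] at h1
  simpa using h1

lemma pvNorm_hor (r c : Int) : pvNorm (r, c) (r, c + 1) = ((r, c), (r, c + 1)) := by
  unfold pvNorm; rw [if_neg]; simp

lemma pvNorm_ver (r c : Int) : pvNorm (r, c) (r + 1, c) = ((r, c), (r + 1, c)) := by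
  unfold pvNorm; rw [if_neg]; simp

lemma pvA_items (S : List ((Int × Int) × (Int × Int))) (rows cols : Int) :
    compute_clues_py S rows cols
      = (pvCells rows cols).map (fun rc => (rc.1, rc.2, pvCountA S rc.1 rc.2)) := by
  unfold compute_clues_py
  have hfun : (fun (d : PySem.Dict (Int × Int) Int) (r : Int) =>
      (PySem.List.pyRange 0 cols 1).foldl (fun d c =>
        let count0 : Int := 0
        let count1 := if pvNorm (r, c) (r, c + 1) ∈ S then count0 + 1 else count0
        let count2 := if pvNorm (r + 1, c) (r + 1, c + 1) ∈ S then count1 + 1 else count1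
        let count3 := if pvNorm (r, c) (r + 1, c) ∈ S then count2 + 1 else count2
        let count4 := if pvNorm (r, c + 1) (r + 1, c + 1) ∈ S then count3 + 1 else count3
        d.insert (r, c) count4) d)
      = (fun (d : PySem.Dict (Int × Int) Int) (r : Int) =>
      (PySem.List.pyRange 0 cols 1).foldl (fun d c => d.insert (r, c) (pvCountA S r c)) d) := by
    funext d r
    congr 1
    funext d c
    simp only [pvNorm_hor, pvNorm_ver]
    congr 1
    unfold pvCountA
    split_ifs <;> ring
  simp only [hfun, pvDouble_fold, List.map_map]
  rfl

lemma pvBump_items (cells : List (Int × Int)) (hnd : cells.Nodup) (g : Int × Int → Int)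
    (d : PySem.Dict (Int × Int) Int) (h : d.items = cells.map (fun rc => (rc, g rc))) (cell : Int × Int) :
    (pvBump d cell).items = cells.map (fun rc => (rc, if rc = cell then g rc + 1 else g rc)) := by
  have hkeys : d.keys = cells := by
    simp [PySem.Dict.keys, h, Function.comp_def]
  have hknd : d.keys.Nodup := by rw [hkeys]; exact hnd
  unfold pvBump
  by_cases hc : d.contains cell = true
  · have hmem : cell ∈ cells := by
      rw [← hkeys]; exact (PySem.Dict.contains_iff_mem_keys d cell).mp hc
    have hget : d.getD cell 0 = g cell := by
      apply PySem.Dict.getD_of_mem_items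
      · rw [h]; exact List.mem_map_of_mem hmem
      · exact hknd
    rw [if_pos hc, PySem.Dict.items_insert_of_contains d _ hc, h, hget, List.map_map]
    apply List.map_congr_left
    intro rc _
    by_cases hrc : rc = cell
    · subst hrc; simp
    · simp [Function.comp, hrc, show (rc == cell) = false by simpa using hrc]
  · have hnm : cell ∉ cells := by
      rw [← hkeys]; intro hm
      exact hc ((PySem.Dict.contains_iff_mem_keys d cell).mpr hm)
    rw [if_neg hc, h]
    apply List.map_congr_left
    intro rc hrc
    have : rc ≠ cell := fun e => hnm (e ▸ hrc)
    simp [this]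

lemma pvScatter_items (cells : List (Int × Int)) (hnd : cells.Nodup)
    (L : List ((Int × Int) × (Int × Int))) (g : Int × Int → Int)
    (d : PySem.Dict (Int × Int) Int) (h : d.items = cells.map (fun rc => (rc, g rc))) :
    (L.foldl (fun d e =>
      let a := e.1.1; let b := e.1.2; let p := e.2.1; let q := e.2.2
      if p = a ∧ q = b + 1 then pvBump (pvBump d (a, b)) (a - 1, b)
      else if q = b ∧ p = a + 1 then pvBump (pvBump d (a, b)) (a, b - 1)
      else d) d).items
      = cells.map (fun rc => (rc, g rc + (L.countP (fun e => pvHits e rc) : Int))) := by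
  induction L generalizing d g with
  | nil => simpa using h
  | cons e L ih =>
    rw [List.foldl_cons]
    have hstep : ((if e.2.1 = e.1.1 ∧ e.2.2 = e.1.2 + 1 then
          pvBump (pvBump d (e.1.1, e.1.2)) (e.1.1 - 1, e.1.2)
        else if e.2.2 = e.1.2 ∧ e.2.1 = e.1.1 + 1 then
          pvBump (pvBump d (e.1.1, e.1.2)) (e.1.1, e.1.2 - 1)
        else d).items)
        = cells.map (fun rc => (rc, g rc + if pvHits e rc then 1 else 0)) := by
      by_cases h1 : e.2.1 = e.1.1 ∧ e.2.2 = e.1.2 + 1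
      · rw [if_pos h1]
        rw [pvBump_items cells hnd _ _ (pvBump_items cells hnd g d h (e.1.1, e.1.2)) (e.1.1 - 1, e.1.2)]
        apply List.map_congr_left
        intro rc _
        unfold pvHits
        rw [if_pos h1]
        rcases rc with ⟨x, y⟩
        by_cases ha : (x, y) = (e.1.1, e.1.2) <;> by_cases hb : (x, y) = (e.1.1 - 1, e.1.2) <;>
          simp_all [Prod.ext_iff] <;> omega
      · rw [if_neg h1]
        by_cases h2 : e.2.2 = e.1.2 ∧ e.2.1 = e.1.1 + 1
        · rw [if_pos h2]
          rw [pvBump_items cells hnd _ _ (pvBump_items cells hnd g d h (e.1.1, e.1.2)) (e.1.1, e.1.2 - 1)]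
          apply List.map_congr_left
          intro rc _
          unfold pvHits
          rw [if_neg h1, if_pos h2]
          rcases rc with ⟨x, y⟩
          by_cases ha : (x, y) = (e.1.1, e.1.2) <;> by_cases hb : (x, y) = (e.1.1, e.1.2 - 1) <;>
            simp_all [Prod.ext_iff] <;> omega
        · rw [if_neg h2, h]
          apply List.map_congr_left
          intro rc _
          unfold pvHits
          rw [if_neg h1, if_neg h2]
          simp
    rw [ih _ _ hstep]
    apply List.map_congr_left
    intro rc _
    rw [List.countP_cons]
    push_cast
    by_cases hh : pvHits e rc <;> simp [hh] <;> ring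

lemma pvHits_iff (e : (Int × Int) × (Int × Int)) (r c : Int) :
    pvHits e (r, c) = decide (e = ((r, c), (r, c + 1)) ∨ e = ((r + 1, c), (r + 1, c + 1))
      ∨ e = ((r, c), (r + 1, c)) ∨ e = ((r, c + 1), (r + 1, c + 1))) := by
  rcases e with ⟨⟨a, b⟩, p, q⟩
  unfold pvHits
  dsimp only
  split_ifs with h1 h2
  · rw [decide_eq_decide]
    obtain ⟨rfl, rfl⟩ := h1
    simp only [Prod.mk.injEq]
    constructor <;> intro h <;> omega
  · rw [decide_eq_decide]
    obtain ⟨rfl, rfl⟩ := h2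
    simp only [Prod.mk.injEq]
    constructor <;> intro h <;> omega
  · rw [eq_comm, decide_eq_false_iff_not]
    simp only [Prod.mk.injEq]
    intro h
    omega

lemma pvCountP_list {E : Type} [DecidableEq E] (D : List E) (e1 e2 e3 e4 : E)
    (h12 : e1 ≠ e2) (h13 : e1 ≠ e3) (h14 : e1 ≠ e4) (h23 : e2 ≠ e3) (h24 : e2 ≠ e4) (h34 : e3 ≠ e4) :
    D.countP (fun e => decide (e = e1 ∨ e = e2 ∨ e = e3 ∨ e = e4))
      = D.count e1 + D.count e2 + D.count e3 + D.count e4 := by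
  induction D with
  | nil => simp
  | cons x xs ih =>
    rw [List.countP_cons, List.count_cons, List.count_cons, List.count_cons, List.count_cons, ih]
    have hstep : (if (decide (x = e1 ∨ x = e2 ∨ x = e3 ∨ x = e4)) = true then 1 else 0)
        = (if x = e1 then 1 else 0) + ((if x = e2 then 1 else 0)
          + ((if x = e3 then 1 else 0) + (if x = e4 then 1 else 0))) := by
      by_cases g1 : x = e1 <;> by_cases g2 : x = e2 <;> by_cases g3 : x = e3 <;>
        by_cases g4 : x = e4 <;> simp_all
    simp only [beq_iff_eq]
    rw [hstep]
    ring

lemma pvCountP_four {E : Type} [DecidableEq E] (D : List E) (hD : D.Nodup) (e1 e2 e3 e4 : E)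
    (h12 : e1 ≠ e2) (h13 : e1 ≠ e3) (h14 : e1 ≠ e4) (h23 : e2 ≠ e3) (h24 : e2 ≠ e4) (h34 : e3 ≠ e4) :
    (D.countP (fun e => decide (e = e1 ∨ e = e2 ∨ e = e3 ∨ e = e4)) : Int)
      = (if e1 ∈ D then 1 else 0) + (if e2 ∈ D then 1 else 0)
        + (if e3 ∈ D then 1 else 0) + (if e4 ∈ D then 1 else 0) := by
  rw [pvCountP_list D e1 e2 e3 e4 h12 h13 h14 h23 h24 h34, hD.count, hD.count, hD.count, hD.count]
  push_cast
  split_ifs <;> ring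

lemma pvCount_four (S : List ((Int × Int) × (Int × Int))) (r c : Int) :
    ((PySem.List.dedup S).countP (fun e => pvHits e (r, c)) : Int) = pvCountA S r c := by
  have hpred : (fun e => pvHits e (r, c))
      = fun e => decide (e = ((r, c), (r, c + 1)) ∨ e = ((r + 1, c), (r + 1, c + 1))
        ∨ e = ((r, c), (r + 1, c)) ∨ e = ((r, c + 1), (r + 1, c + 1))) := by
    funext e; exact pvHits_iff e r c
  rw [hpred, pvCountP_four _ (PySem.List.nodup_dedup S) _ _ _ _
    (by intro h; injection h with hA hB; injection hA with u1 u2; injection hB with u3 u4; omega)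
    (by intro h; injection h with hA hB; injection hA with u1 u2; injection hB with u3 u4; omega)
    (by intro h; injection h with hA hB; injection hA with u1 u2; injection hB with u3 u4; omega)
    (by intro h; injection h with hA hB; injection hA with u1 u2; injection hB with u3 u4; omega)
    (by intro h; injection h with hA hB; injection hA with u1 u2; injection hB with u3 u4; omega)
    (by intro h; injection h with hA hB; injection hA with u1 u2; injection hB with u3 u4; omega)]
  unfold pvCountA
  simp only [PySem.List.mem_dedup]

lemma pvB_items (S : List ((Int × Int) × (Int × Int))) (rows cols : Int) :
    compute_clues_py_alt S rows cols
      = (pvCells rows cols).map (fun rc =>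
          (rc.1, rc.2, (0 : Int) + ((PySem.List.dedup S).countP (fun e => pvHits e rc) : Int))) := by
  unfold compute_clues_py_alt
  simp only [pvScatter_items (pvCells rows cols) (pvCells_nodup rows cols) (PySem.List.dedup S)
    (fun _ => (0 : Int)) _ (pvDouble_fold (fun _ _ => (0 : Int)) rows cols), List.map_map]
  rfl

-- ===== VERDICT (by name: the statement is the Claim_ definition above) =====
theorem compute_clues_py_spec : Claim_equal_compute_clues_py := by
  intro S rows cols _
  unfold Spec_compute_clues_py
  rw [pvA_items, pvB_items]
  apply List.map_congr_left
  intro rc _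
  rcases rc with ⟨r, c⟩
  rw [pvCount_four S r c]
  simp
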